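-- pv_equiv track=rewrite | github.com/jdvelasq/techminer2 | scripts/print_subpackages.py | build_tree_lines
-- ===== SOURCE A (Python) =====
-- def build_tree_lines(paths, root):
--     # paths: list of full paths ending with '/'
--     root = root.rstrip("/\\") + "/"
--     tree = {}
--
--     def insert(parts):
--         node = tree
--         for p in parts:
--             node = node.setdefault(p, {})
--
--     for p in paths:
--         if p == root:
--             continue
--         rel = p[len(root) :].strip("/")
--         if not rel:
--             continue
--         parts = rel.split("/")
--         insert(parts)
--
--     lines = [root]
--
--     def render(node, prefix=""):
--         keys = sorted(node.keys())
--         for i, k in enumerate(keys):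
--             last = i == (len(keys) - 1)
--             connector = "└── " if last else "├── "
--             lines.append(prefix + connector + k + "/")
--             if node[k]:
--                 extension = "    " if last else "│   "
--                 render(node[k], prefix + extension)
--
--     render(tree, "")
--     return lines
-- ===== SOURCE B (Python) =====
-- def build_tree_lines(paths, root):
--     # B: no trie; normalize paths to component lists, sort once lexicographically
--     # (by component tuples), then render by recursive grouping on first component.
--     root = root.rstrip("/\\") + "/"
--     items = []
--     for p in paths:
--         if p == root:
--             continue
--         rel = p[len(root):].strip("/")
--         if rel:
--             items.append(rel.split("/"))
--     items.sort()
--     lines = [root]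
--
--     def render(items, prefix):
--         # items: sorted list of non-empty component lists
--         while items:
--             head = items[0][0]
--             k = 1
--             while k < len(items) and items[k][0] == head:
--                 k += 1
--             tails = [it[1:] for it in items[:k] if len(it) > 1]
--             items = items[k:]
--             last = not items
--             lines.append(prefix + ("└── " if last else "├── ") + head + "/")
--             if tails:
--                 render(tails, prefix + ("    " if last else "│   "))
--
--     render(items, "")
--     return lines
-- ===== Notes on version B (the rewrite author's own statement) =====
-- stated objective: alternative
-- what changed: B never builds A's nested-dict trie: it normalizes each path to its component list, sorts all component lists once lexicographically (by components, matching A's per-level sorted DFS order), and renders by recursively peeling the maximal run sharing the first component (group-by-head), which reproduces the connectors and indentation.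
import Mathlib
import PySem

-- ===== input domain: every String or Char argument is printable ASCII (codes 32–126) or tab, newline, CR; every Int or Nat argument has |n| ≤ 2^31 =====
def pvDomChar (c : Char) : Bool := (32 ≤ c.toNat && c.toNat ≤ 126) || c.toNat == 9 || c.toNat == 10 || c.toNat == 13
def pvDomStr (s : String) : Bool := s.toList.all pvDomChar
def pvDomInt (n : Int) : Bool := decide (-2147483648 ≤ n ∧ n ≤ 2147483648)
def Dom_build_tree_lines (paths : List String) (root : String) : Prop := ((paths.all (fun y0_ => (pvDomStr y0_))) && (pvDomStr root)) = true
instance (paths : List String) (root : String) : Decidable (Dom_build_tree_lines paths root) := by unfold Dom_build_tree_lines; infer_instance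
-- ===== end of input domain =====

-- B replaces A's nested-dict trie + recursive sorted-keys DFS by a single global
-- lexicographic sort of the component lists followed by a recursive group-by-head
-- rendering pass (objective: alternative decomposition, no trie is ever built).

-- ===== PORT A =====
-- shared helper: port of str.rstrip("/\\") (exact for this fixed char set)
def pvRstripSlash (s : List Char) : List Char :=
  ((s.reverse).dropWhile (fun c => c == '/' || c == '\\')).reverse

-- A's nested dict-of-dicts trie; a nested inductive is not allowed, so the
-- children dict (insertion-ordered assoc list) is fused into the constructors:
-- `node k c r` = first entry (k ↦ c) followed by the remaining entries r.
inductive PyTrie where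
  | nil : PyTrie
  | node : List Char → PyTrie → PyTrie → PyTrie
deriving DecidableEq, Repr

-- `insert(parts)`: walk the parts, `node.setdefault(p, {})` at each level
def trieInsert : PyTrie → List (List Char) → PyTrie
  | t, [] => t
  | PyTrie.nil, p :: ps => PyTrie.node p (trieInsert PyTrie.nil ps) PyTrie.nil
  | PyTrie.node k c r, p :: ps =>
    if k = p then PyTrie.node k (trieInsert c ps) r
    else PyTrie.node k c (trieInsert r (p :: ps))
termination_by t parts => (sizeOf t, sizeOf parts)

def trieKeys : PyTrie → List (List Char)
  | PyTrie.nil => []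
  | PyTrie.node k _ r => k :: trieKeys r

-- dict lookup node[k] (nil when absent; render only looks up present keys)
def trieFind : PyTrie → List Char → PyTrie
  | PyTrie.nil, _ => PyTrie.nil
  | PyTrie.node k c r, q => if k = q then c else trieFind r q

def trieDepth : PyTrie → Nat
  | PyTrie.nil => 0
  | PyTrie.node _ c r => max (trieDepth c + 1) (trieDepth r)

-- `render(node, prefix)`: the fuel argument is only a totality guard (any fuel
-- larger than the trie depth reaches no `0` case; build_tree_lines passes depth+1)
mutual
def renderAF : Nat → PyTrie → List Char → List String
  | 0, _, _ => []
  | n + 1, t, pre => renderKeys n t (PySem.List.sorted (trieKeys t) (fun k => k) false) pre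
  termination_by n _ _ => (n, 0)
def renderKeys : Nat → PyTrie → List (List Char) → List Char → List String
  | _, _, [], _ => []
  | n, t, k :: ks, pre =>
    let last := ks.isEmpty
    let c := trieFind t k
    String.ofList (pre ++ (if last then "└── ".toList else "├── ".toList) ++ k ++ ['/']) ::
      ((if c ≠ PyTrie.nil then
          renderAF n c (pre ++ (if last then "    ".toList else "│   ".toList))
        else []) ++ renderKeys n t ks pre)
  termination_by n _ ks _ => (n, ks.length + 1)
end

def build_tree_lines (paths : List String) (root : String) : List String :=
  let rootL := pvRstripSlash root.toList ++ ['/']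
  let tree := paths.foldl (fun tr p =>
    if p.toList = rootL then tr
    else
      let rel := PySem.Chars.stripChars (p.toList.drop rootL.length) ['/']
      if rel = [] then tr else trieInsert tr (PySem.Chars.splitOn rel ['/'])) PyTrie.nil
  String.ofList rootL :: renderAF (trieDepth tree + 1) tree []

-- ===== PORT B =====
def pvMu (l : List (List (List Char))) : Nat := (l.map (fun x => x.length + 1)).sum

-- termination facts cited by renderB's decreasing_by
theorem pvMu_sublist {l1 l2 : List (List (List Char))} (h : l1.Sublist l2) : pvMu l1 ≤ pvMu l2 :=
  List.Sublist.sum_le_sum (h.map _) (by intro a _; positivity)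

theorem pvMu_tails_le (l : List (List (List Char))) :
    pvMu ((l.filter (fun x => 1 < x.length)).map (fun x => x.drop 1)) + l.length ≤ pvMu l := by
  induction l with
  | nil => simp [pvMu]
  | cons x l ih =>
    by_cases h : 1 < x.length <;> simp [pvMu, h] at ih ⊢ <;> omega

theorem pvMu_dec_tails (p : List (List Char) → Bool) (h : List Char) (t : List (List Char))
    (rest : List (List (List Char))) (hp : p (h :: t) = true) :
    pvMu (((((h :: t) :: rest).takeWhile p).filter (fun x => 1 < x.length)).map (fun x => x.drop 1))
      < pvMu ((h :: t) :: rest) := by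
  have h1 := pvMu_tails_le (((h :: t) :: rest).takeWhile p)
  have h2 : pvMu (((h :: t) :: rest).takeWhile p) ≤ pvMu ((h :: t) :: rest) :=
    pvMu_sublist (List.takeWhile_sublist p)
  have h3 : ((h :: t) :: rest).takeWhile p = (h :: t) :: rest.takeWhile p := by
    simp [hp]
  rw [h3] at h1 h2 ⊢
  have h4 : 1 ≤ ((h :: t) :: rest.takeWhile p).length := by simp
  omega

theorem pvMu_dec_rest (p : List (List Char) → Bool) (h : List Char) (t : List (List Char))
    (rest : List (List (List Char))) (hp : p (h :: t) = true) :
    pvMu (((h :: t) :: rest).dropWhile p) < pvMu ((h :: t) :: rest) := by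
  have h3 : ((h :: t) :: rest).dropWhile p = rest.dropWhile p := by
    simp [hp]
  have h2 : pvMu (rest.dropWhile p) ≤ pvMu rest := pvMu_sublist (List.dropWhile_sublist p)
  have h5 : pvMu ((h :: t) :: rest) = (t.length + 2) + pvMu rest := by
    simp [pvMu]
  rw [h3]
  omega

-- `render(items, prefix)` of B: items is a sorted list of component lists; peel
-- the maximal run sharing the first component, emit its line, recurse into the
-- tails, then continue with the rest.  (The `[] :: rest` branch is unreachable
-- for the lists B builds — Python B would raise there — it only keeps the port total.)
def renderB : List (List (List Char)) → List Char → List String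
  | [], _ => []
  | [] :: rest, pre => renderB rest pre
  | (h :: t) :: rest, pre =>
    let its := (h :: t) :: rest
    let grp := its.takeWhile (fun x => x.head? == some h)
    let rest' := its.dropWhile (fun x => x.head? == some h)
    let tails := (grp.filter (fun x => 1 < x.length)).map (fun x => x.drop 1)
    let last := rest'.isEmpty
    String.ofList (pre ++ (if last then "└── ".toList else "├── ".toList) ++ h ++ ['/']) ::
      ((if tails.isEmpty then []
        else renderB tails (pre ++ (if last then "    ".toList else "│   ".toList))) ++
       renderB rest' pre)
termination_by l _ => pvMu l
decreasing_by
  · simp [pvMu]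
  · exact pvMu_dec_tails _ h t rest (by simp)
  · exact pvMu_dec_rest _ h t rest (by simp)

def build_tree_lines_alt (paths : List String) (root : String) : List String :=
  let rootL := pvRstripSlash root.toList ++ ['/']
  let items := paths.foldl (fun acc p =>
    if p.toList = rootL then acc
    else
      let rel := PySem.Chars.stripChars (p.toList.drop rootL.length) ['/']
      if rel = [] then acc else acc ++ [PySem.Chars.splitOn rel ['/']]) []
  String.ofList rootL :: renderB (PySem.List.sorted items (fun x => x) false) []

-- ===== PRECONDITION & SPEC =====
def Spec_build_tree_lines (paths : List String) (root : String) (out : List String) : Prop := out = build_tree_lines_alt paths root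
instance (paths : List String) (root : String) (out : List String) : Decidable (Spec_build_tree_lines paths root out) := by unfold Spec_build_tree_lines; infer_instance

-- ===== CLAIM (what is proved, stated in full; the proofs are below) =====
def Claim_equal_build_tree_lines : Prop := ∀ (paths : List String) (root : String), Dom_build_tree_lines paths root → Spec_build_tree_lines paths root (build_tree_lines paths root)

-- ===== LEMMAS AND PROOFS =====
theorem trieInsert_nil_parts (t : PyTrie) : trieInsert t [] = t := by
  cases t <;> simp [trieInsert]

theorem trieKeys_insert (t : PyTrie) (p : List Char) (ps : List (List Char)) :
    trieKeys (trieInsert t (p :: ps)) =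
      if p ∈ trieKeys t then trieKeys t else trieKeys t ++ [p] := by
  induction t with
  | nil => simp [trieInsert, trieKeys]
  | node k c r ihc ihr =>
    by_cases h : k = p
    · subst h; simp [trieInsert, trieKeys]
    · simp [trieInsert, h, trieKeys, ihr]
      by_cases hm : p ∈ trieKeys r <;> simp [hm, h, Ne.symm h]

theorem trieFind_insert (t : PyTrie) (p : List Char) (ps : List (List Char)) (q : List Char) :
    trieFind (trieInsert t (p :: ps)) q =
      if q = p then trieInsert (trieFind t p) ps else trieFind t q := by
  induction t with
  | nil =>
    by_cases h : q = p
    · subst h; simp [trieInsert, trieFind]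
    · simp [trieInsert, trieFind, h, Ne.symm h]
  | node k c r ihc ihr =>
    by_cases hk : k = p
    · subst hk
      by_cases hq : q = k
      · subst hq; simp [trieInsert, trieFind]
      · simp [trieInsert, trieFind, hq, Ne.symm hq]
    · by_cases hq : k = q
      · subst hq
        simp [trieInsert, hk, trieFind, Ne.symm hk]
      · simp [trieInsert, hk, trieFind, hq, ihr]

theorem trieInsert_ne_nil (t : PyTrie) (p : List Char) (ps : List (List Char)) :
    trieInsert t (p :: ps) ≠ PyTrie.nil := by
  cases t <;> simp [trieInsert] <;> split <;> simp

theorem foldl_insert_eq_nil (L : List (List (List Char))) :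
    ∀ t, L.foldl trieInsert t = PyTrie.nil ↔ t = PyTrie.nil ∧ ∀ x ∈ L, x = [] := by
  induction L with
  | nil => simp
  | cons x L ih =>
    intro t
    cases x with
    | nil => simp [trieInsert_nil_parts, ih]
    | cons p ps =>
      simp only [List.foldl_cons, ih]
      constructor
      · rintro ⟨h, _⟩; exact absurd h (trieInsert_ne_nil t p ps)
      · rintro ⟨_, h⟩; exact absurd (h (p :: ps) (by simp)) (by simp)

def groupT (k : List Char) (L : List (List (List Char))) : List (List (List Char)) :=
  L.filterMap (fun x => if x.head? = some k then some x.tail else none)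

def headsOf (L : List (List (List Char))) : List (List Char) := L.filterMap List.head?

theorem trieFind_foldl (L : List (List (List Char))) :
    ∀ (t : PyTrie) (k : List Char),
      trieFind (L.foldl trieInsert t) k = (groupT k L).foldl trieInsert (trieFind t k) := by
  induction L with
  | nil => intro t k; simp [groupT]
  | cons x L ih =>
    intro t k
    cases x with
    | nil => simp [groupT, trieInsert_nil_parts] at ih ⊢; exact ih t k
    | cons p ps =>
      by_cases h : p = k
      · subst h
        simp only [List.foldl_cons, ih, groupT, List.filterMap_cons, List.head?_cons, if_pos rfl]
        simp [trieFind_insert, groupT]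
      · simp only [List.foldl_cons, ih, groupT, List.filterMap_cons, List.head?_cons]
        rw [trieFind_insert]
        simp [h, Ne.symm h, groupT]

theorem mem_trieKeys_foldl (L : List (List (List Char))) :
    ∀ (t : PyTrie) (k : List Char),
      k ∈ trieKeys (L.foldl trieInsert t) ↔ k ∈ trieKeys t ∨ k ∈ headsOf L := by
  induction L with
  | nil => simp [headsOf]
  | cons x L ih =>
    intro t k
    cases x with
    | nil => simp [headsOf, trieInsert_nil_parts, ih, headsOf]
    | cons p ps =>
      simp only [List.foldl_cons, ih, trieKeys_insert, headsOf, List.filterMap_cons,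
        List.head?_cons]
      split <;> rename_i hm
      · simp only [Option.some.injEq, List.mem_cons]
        constructor
        · rintro (h | h)
          · exact Or.inl h
          · exact Or.inr (Or.inr h)
        · rintro (h | h | h)
          · exact Or.inl h
          · exact Or.inl (h ▸ hm)
          · exact Or.inr h
      · simp only [List.mem_append, List.mem_singleton, Option.some.injEq, List.mem_cons]
        tauto

theorem nodup_trieKeys_foldl (L : List (List (List Char))) :
    ∀ (t : PyTrie), (trieKeys t).Nodup → (trieKeys (L.foldl trieInsert t)).Nodup := by
  induction L with
  | nil => intro t h; simpa
  | cons x L ih =>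
    intro t h
    cases x with
    | nil => simpa [trieInsert_nil_parts] using ih t h
    | cons p ps =>
      refine ih _ ?_
      rw [trieKeys_insert]
      split
      · exact h
      · rename_i hm
        simp only [List.nodup_append, List.nodup_singleton, true_and]
        constructor
        · exact h
        · intro a ha b hb
          rw [List.mem_singleton] at hb
          subst hb
          intro hab
          apply hm
          rw [← hab]
          exact ha

theorem foldl_insert_filter (L : List (List (List Char))) :
    ∀ t, (L.filter (fun x => !x.isEmpty)).foldl trieInsert t = L.foldl trieInsert t := by
  induction L with
  | nil => simp
  | cons x L ih =>
    intro t
    cases x with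
    | nil => simp [trieInsert_nil_parts, ih]
    | cons p ps => simp [ih]

theorem trieDepth_find_lt (t : PyTrie) (k : List Char) (h : k ∈ trieKeys t) :
    trieDepth (trieFind t k) < trieDepth t := by
  induction t with
  | nil => simp [trieKeys] at h
  | node k' c r ihc ihr =>
    simp only [trieKeys, List.mem_cons] at h
    by_cases hk : k' = k
    · subst hk; simp [trieFind, trieDepth]
    · rcases h with h | h
      · exact absurd (Eq.symm h) hk
      · simp only [trieFind, if_neg hk, trieDepth]
        exact (ihr h).trans_le (by omega)

-- ===== instance bridges for sorted (core List LT/DecidableLT vs LinearOrder's) =====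
theorem sorted_bridgeK (xs : List (List Char)) :
    PySem.List.sorted xs (fun x => x) false
      = @PySem.List.sorted (List Char) (List Char) List.instLT LinearOrder.toDecidableLT xs (fun x => x) false := by
  congr 1

theorem sorted_bridgeL (xs : List (List (List Char))) :
    PySem.List.sorted xs (fun x => x) false
      = @PySem.List.sorted (List (List Char)) (List (List Char)) List.instLT LinearOrder.toDecidableLT xs (fun x => x) false := by
  congr 1

theorem sortedL_eq_of_perm_of_pairwise (xs ys : List (List (List Char))) (h : ys.Perm xs)
    (hp : ys.Pairwise (· ≤ ·)) : PySem.List.sorted xs (fun x => x) false = ys := by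
  rw [sorted_bridgeL]
  exact PySem.List.sorted_id_eq_of_perm_of_pairwise xs ys h hp

theorem sortedK_eq_of_perm (xs ys : List (List Char)) (h : xs.Perm ys) :
    PySem.List.sorted xs (fun x => x) false = PySem.List.sorted ys (fun x => x) false := by
  rw [sorted_bridgeK, sorted_bridgeK]
  exact PySem.List.sorted_eq_sorted_of_perm xs ys (fun x => x) (fun a b hab => hab) h

theorem sortedL_pairwise (xs : List (List (List Char))) :
    (PySem.List.sorted xs (fun x => x) false).Pairwise (· ≤ ·) := by
  rw [sorted_bridgeL]
  exact PySem.List.sorted_pairwise xs (fun x => x)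

theorem sortedK_dedup_pairwise_lt (xs : List (List Char)) :
    (PySem.List.sorted (PySem.List.dedup xs) (fun x => x) false).Pairwise (· < ·) := by
  rw [sorted_bridgeK]
  have := PySem.List.sorted_ofList_pairwise_lt (κ := List Char) xs
  rw [← PySem.List.dedup_eq_ofList] at this
  exact this

-- ===== decomposition of the sorted item list into head groups =====
def sortedHeads (L : List (List (List Char))) : List (List Char) :=
  PySem.List.sorted (PySem.List.dedup (headsOf L)) (fun x => x) false

def grOf (L : List (List (List Char))) (k : List Char) : List (List (List Char)) :=
  (PySem.List.sorted (groupT k L) (fun x => x) false).map (fun x => k :: x)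

theorem map_cons_groupT (k : List Char) (L : List (List (List Char))) :
    (groupT k L).map (fun x => k :: x) = L.filter (fun x => x.head? == some k) := by
  induction L with
  | nil => simp [groupT]
  | cons x L ih =>
    cases x with
    | nil => simp [groupT, List.filterMap_cons] at ih ⊢; exact ih
    | cons p ps =>
      by_cases h : p = k
      · subst h; simp [groupT, List.filterMap_cons] at ih ⊢; exact ih
      · simp [groupT, List.filterMap_cons, h, Ne.symm h] at ih ⊢; exact ih

theorem flatMap_filter_perm (ks : List (List Char)) :
    ∀ L : List (List (List Char)), ks.Nodup →
      (∀ x ∈ L, ∃ k ∈ ks, x.head? = some k) →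
      (ks.flatMap (fun k => L.filter (fun x => x.head? == some k))).Perm L := by
  induction ks with
  | nil =>
    intro L _ hL
    have : L = [] := by
      cases L with
      | nil => rfl
      | cons x L => rcases hL x (by simp) with ⟨k, hk, _⟩; simp at hk
    simp [this]
  | cons k ks ih =>
    intro L hnd hL
    simp only [List.flatMap_cons]
    have hfix : ∀ k' ∈ ks,
        L.filter (fun x => x.head? == some k')
          = (L.filter (fun x => !(x.head? == some k))).filter (fun x => x.head? == some k') := by
      intro k' hk'
      have hne : k' ≠ k := by
        rintro rfl; exact (List.nodup_cons.mp hnd).1 hk'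
      rw [List.filter_filter]
      apply List.filter_congr
      intro x _
      by_cases hx : x.head? = some k'
      · simp [hx, hne]
      · simp [hx]
    have hflat : ks.flatMap (fun k' => L.filter (fun x => x.head? == some k'))
        = ks.flatMap (fun k' => (L.filter (fun x => !(x.head? == some k))).filter
            (fun x => x.head? == some k')) :=
      List.flatMap_congr hfix
    rw [hflat]
    have hmem : ∀ x ∈ L.filter (fun x => !(x.head? == some k)), ∃ k' ∈ ks, x.head? = some k' := by
      intro x hx
      rw [List.mem_filter] at hx
      rcases hL x hx.1 with ⟨k'', hk'', hh⟩
      rcases List.mem_cons.mp hk'' with h | h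
      · subst h; simp [hh] at hx
      · exact ⟨k'', h, hh⟩
    have h2 := ih (L.filter (fun x => !(x.head? == some k))) (List.nodup_cons.mp hnd).2 hmem
    exact (List.Perm.append_left _ h2).trans (List.filter_append_perm _ L)

theorem pairwise_flatMap' {α β : Type} {R : β → β → Prop} (f : α → List β) (ks : List α)
    (hin : ∀ k ∈ ks, (f k).Pairwise R)
    (hcross : ks.Pairwise (fun k1 k2 => ∀ x ∈ f k1, ∀ y ∈ f k2, R x y)) :
    (ks.flatMap f).Pairwise R := by
  induction ks with
  | nil => simp
  | cons k ks ih =>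
    simp only [List.flatMap_cons, List.pairwise_append]
    refine ⟨hin k (by simp), ih (fun k' h => hin k' (by simp [h])) (List.pairwise_cons.mp hcross).2, ?_⟩
    intro a ha b hb
    rw [List.mem_flatMap] at hb
    rcases hb with ⟨k', hk', hbk'⟩
    exact (List.pairwise_cons.mp hcross).1 k' hk' a ha b hbk'

theorem cons_le_cons_of_le (k : List Char) (a b : List (List Char)) (h : a ≤ b) :
    (k :: a : List (List Char)) ≤ k :: b := by
  rcases lt_or_eq_of_le h with h | h
  · exact le_of_lt (List.cons_lt_cons_iff.mpr (Or.inr ⟨rfl, h⟩))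
  · subst h; exact le_refl _

theorem cons_le_cons_of_lt (k1 k2 : List Char) (a b : List (List Char)) (h : k1 < k2) :
    (k1 :: a : List (List Char)) ≤ k2 :: b :=
  le_of_lt (List.cons_lt_cons_iff.mpr (Or.inl h))

theorem flatMap_perm_pointwise {α β : Type} (f g : α → List β) (ks : List α)
    (h : ∀ k ∈ ks, (f k).Perm (g k)) : (ks.flatMap f).Perm (ks.flatMap g) := by
  induction ks with
  | nil => simp
  | cons k ks ih =>
    simp only [List.flatMap_cons]
    exact (h k (by simp)).append (ih (fun k' hk' => h k' (by simp [hk'])))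

theorem mem_sortedHeads (L : List (List (List Char))) (k : List Char) :
    k ∈ sortedHeads L ↔ k ∈ headsOf L := by
  rw [sortedHeads, PySem.List.mem_sorted, PySem.List.mem_dedup]

theorem nodup_sortedHeads (L : List (List (List Char))) : (sortedHeads L).Nodup :=
  ((PySem.List.sorted_perm _ _ _).nodup_iff).mpr (PySem.List.nodup_dedup _)

theorem pairwise_lt_sortedHeads (L : List (List (List Char))) :
    (sortedHeads L).Pairwise (· < ·) := sortedK_dedup_pairwise_lt _

-- the central decomposition: sorting all items = concatenating per-head sorted groups
theorem sorted_decomp (L : List (List (List Char))) (hne : ∀ x ∈ L, x ≠ []) :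
    PySem.List.sorted L (fun x => x) false = (sortedHeads L).flatMap (grOf L) := by
  apply sortedL_eq_of_perm_of_pairwise
  · -- permutation
    have h1 : ((sortedHeads L).flatMap (grOf L)).Perm
        ((sortedHeads L).flatMap (fun k => L.filter (fun x => x.head? == some k))) := by
      apply flatMap_perm_pointwise
      intro k _
      have : (grOf L k).Perm ((groupT k L).map (fun x => k :: x)) :=
        (PySem.List.sorted_perm _ _ _).map _
      rw [map_cons_groupT] at this
      exact this
    refine h1.trans (flatMap_filter_perm _ L (nodup_sortedHeads L) ?_)
    intro x hx
    cases x with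
    | nil => exact absurd rfl (hne [] hx)
    | cons p ps =>
      exact ⟨p, (mem_sortedHeads L p).mpr (List.mem_filterMap.mpr ⟨p :: ps, hx, rfl⟩), rfl⟩
  · -- pairwise ≤
    apply pairwise_flatMap'
    · intro k _
      have := sortedL_pairwise (groupT k L)
      exact this.map _ (fun a b hab => cons_le_cons_of_le k a b hab)
    · apply (pairwise_lt_sortedHeads L).imp
      intro k1 k2 h12 x hx y hy
      rw [grOf, List.mem_map] at hx hy
      rcases hx with ⟨a, _, rfl⟩
      rcases hy with ⟨b, _, rfl⟩
      exact cons_le_cons_of_lt k1 k2 a b h12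

theorem sorted_filter_comm (M : List (List (List Char))) (p : List (List Char) → Bool) :
    (PySem.List.sorted M (fun x => x) false).filter p
      = PySem.List.sorted (M.filter p) (fun x => x) false := by
  symm
  apply sortedL_eq_of_perm_of_pairwise
  · exact (PySem.List.sorted_perm M _ _).filter p
  · exact (sortedL_pairwise M).filter p

-- takeWhile / dropWhile over a ++ b when everything in a passes and everything in b fails
theorem takeWhile_all_append {α : Type} (p : α → Bool) (a b : List α)
    (ha : ∀ x ∈ a, p x = true) (hb : ∀ x ∈ b, p x = false) :
    (a ++ b).takeWhile p = a := by
  induction a with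
  | nil =>
    cases b with
    | nil => rfl
    | cons y b => simp [List.takeWhile_cons, hb y (by simp)]
  | cons x a ih =>
    simp only [List.cons_append, List.takeWhile_cons, ha x (by simp)]
    simp [ih (fun x h => ha x (by simp [h])) ]

theorem dropWhile_all_append {α : Type} (p : α → Bool) (a b : List α)
    (ha : ∀ x ∈ a, p x = true) (hb : ∀ x ∈ b, p x = false) :
    (a ++ b).dropWhile p = b := by
  induction a with
  | nil =>
    cases b with
    | nil => rfl
    | cons y b => simp [List.dropWhile_cons, hb y (by simp)]
  | cons x a ih =>
    simp only [List.cons_append, List.dropWhile_cons, ha x (by simp)]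
    simp [ih (fun x h => ha x (by simp [h])) ]

-- fuel independence of renderAF above the trie depth
theorem renderAF_fuel : ∀ n m : Nat, ∀ (t : PyTrie) (pre : List Char),
    trieDepth t < n → trieDepth t < m → renderAF n t pre = renderAF m t pre := by
  intro n
  induction n using Nat.strong_induction_on with
  | _ n ihn =>
    intro m t pre hn hm
    cases n with
    | zero => omega
    | succ n' =>
      cases m with
      | zero => omega
      | succ m' =>
        simp only [renderAF]
        have hkeys : ∀ k ∈ PySem.List.sorted (trieKeys t) (fun k => k) false, k ∈ trieKeys t := by
          intro k hk; rwa [PySem.List.mem_sorted] at hk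
        revert hkeys
        generalize PySem.List.sorted (trieKeys t) (fun k => k) false = ks
        intro hkeys
        induction ks with
        | nil => simp [renderKeys]
        | cons k ks ihks =>
          simp only [renderKeys]
          have hdc : trieDepth (trieFind t k) < trieDepth t :=
            trieDepth_find_lt t k (hkeys k (by simp))
          have hrec : renderAF n' (trieFind t k)
                (pre ++ (if ks.isEmpty then "    ".toList else "│   ".toList))
              = renderAF m' (trieFind t k)
                (pre ++ (if ks.isEmpty then "    ".toList else "│   ".toList)) := by
            exact ihn n' (by omega) m' _ _ (by omega) (by omega)
          rw [hrec, ihks (fun k' hk' => hkeys k' (by simp [hk']))]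

-- ===== size bounds for the recursion =====
theorem pvMu_groupT_le (k : List Char) (L : List (List (List Char))) :
    pvMu (groupT k L) ≤ pvMu L := by
  induction L with
  | nil => simp [groupT]
  | cons x L ih =>
    cases x with
    | nil => simp [groupT, List.filterMap_cons, pvMu] at ih ⊢; omega
    | cons p ps =>
      by_cases h : p = k
      · subst h
        simp [groupT, List.filterMap_cons, pvMu] at ih ⊢; omega
      · simp [groupT, List.filterMap_cons, h, pvMu] at ih ⊢; omega

theorem pvMu_groupT_lt (k : List Char) (L : List (List (List Char))) (h : k ∈ headsOf L) :
    pvMu (groupT k L) < pvMu L := by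
  induction L with
  | nil => simp [headsOf] at h
  | cons x L ih =>
    cases x with
    | nil =>
      simp only [headsOf, List.filterMap_cons, List.head?_nil] at h
      have := ih h
      simp [groupT, List.filterMap_cons, pvMu] at this ⊢; omega
    | cons p ps =>
      by_cases hp : p = k
      · subst hp
        have := pvMu_groupT_le p L
        simp [groupT, List.filterMap_cons, pvMu] at this ⊢; omega
      · simp only [headsOf, List.filterMap_cons, List.head?_cons] at h
        rcases List.mem_cons.mp h with h' | h'
        · exact absurd h'.symm hp
        · have := ih h'
          simp [groupT, List.filterMap_cons, hp, pvMu] at this ⊢; omega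

theorem groupT_ne_nil (k : List Char) (L : List (List (List Char))) (h : k ∈ headsOf L) :
    groupT k L ≠ [] := by
  rw [headsOf, List.mem_filterMap] at h
  rcases h with ⟨x, hx, hh⟩
  intro hcon
  have : x.tail ∈ groupT k L := List.mem_filterMap.mpr ⟨x, hx, by simp [hh]⟩
  simp [hcon] at this

theorem tails_of_grOf (L : List (List (List Char))) (k : List Char) :
    ((grOf L k).filter (fun x => 1 < x.length)).map (fun x => x.drop 1)
      = PySem.List.sorted ((groupT k L).filter (fun x => !x.isEmpty)) (fun x => x) false := by
  rw [grOf, List.filter_map, List.map_map]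
  have hcong : (PySem.List.sorted (groupT k L) (fun x => x) false).filter
        ((fun x => decide (1 < x.length)) ∘ (fun x => k :: x))
      = (PySem.List.sorted (groupT k L) (fun x => x) false).filter (fun x => !x.isEmpty) := by
    apply List.filter_congr
    intro x _
    cases x <;> simp
  rw [hcong, sorted_filter_comm]
  have : (fun x => List.drop 1 x) ∘ (fun x => k :: x) = (id : List (List Char) → List (List Char)) := by
    funext x; rfl
  rw [this, List.map_id]

theorem inner_render (L : List (List (List Char)))
    (outerIH : ∀ L', pvMu L' < pvMu L → (∀ x ∈ L', x ≠ []) → ∀ pre' : List Char,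
      renderAF (trieDepth (L'.foldl trieInsert PyTrie.nil) + 1)
          (L'.foldl trieInsert PyTrie.nil) pre'
        = renderB (PySem.List.sorted L' (fun x => x) false) pre') :
    ∀ (ks : List (List Char)) (n : Nat) (pre : List Char),
      (∀ k ∈ ks, k ∈ headsOf L) → ks.Pairwise (· < ·) →
      trieDepth (L.foldl trieInsert PyTrie.nil) ≤ n →
      renderKeys n (L.foldl trieInsert PyTrie.nil) ks pre
        = renderB (ks.flatMap (grOf L)) pre := by
  intro ks
  induction ks with
  | nil => intro n pre _ _ _; simp [renderKeys, renderB]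
  | cons k ks ihks =>
    intro n pre hmem hpair hdepth
    have hkh : k ∈ headsOf L := hmem k (by simp)
    -- the first group is nonempty and every element starts with k
    have hgne : groupT k L ≠ [] := groupT_ne_nil k L hkh
    have hsne : PySem.List.sorted (groupT k L) (fun x => x) false ≠ [] := by
      rw [Ne, PySem.List.sorted_eq_nil_iff]; exact hgne
    obtain ⟨y, ys, hsort⟩ : ∃ y ys, PySem.List.sorted (groupT k L) (fun x => x) false = y :: ys := by
      cases hs : PySem.List.sorted (groupT k L) (fun x => x) false with
      | nil => exact absurd hs hsne
      | cons y ys => exact ⟨y, ys, rfl⟩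
    have hgr : grOf L k = (k :: y) :: ys.map (fun x => k :: x) := by
      rw [grOf, hsort]; rfl
    have hflat : (k :: ks).flatMap (grOf L)
        = (k :: y) :: (ys.map (fun x => k :: x) ++ ks.flatMap (grOf L)) := by
      rw [List.flatMap_cons, hgr]; rfl
    -- takeWhile / dropWhile split
    have hA : ∀ x ∈ grOf L k, (x.head? == some k) = true := by
      intro x hx
      rw [grOf, List.mem_map] at hx
      rcases hx with ⟨a, _, rfl⟩
      simp
    have hB : ∀ x ∈ ks.flatMap (grOf L), (x.head? == some k) = false := by
      intro x hx
      rw [List.mem_flatMap] at hx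
      rcases hx with ⟨k', hk', hx⟩
      rw [grOf, List.mem_map] at hx
      rcases hx with ⟨a, _, rfl⟩
      have : k < k' := (List.pairwise_cons.mp hpair).1 k' hk'
      simp [List.head?_cons]
      exact fun h => absurd (h ▸ this) (lt_irrefl k')
    have htake : ((k :: y) :: (ys.map (fun x => k :: x) ++ ks.flatMap (grOf L))).takeWhile
          (fun x => x.head? == some k) = grOf L k := by
      have h0 := takeWhile_all_append (fun x => x.head? == some k) (grOf L k)
        (ks.flatMap (grOf L)) hA hB
      rw [hgr] at h0
      rw [List.cons_append] at h0
      rw [hgr]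
      exact h0
    have hdrop : ((k :: y) :: (ys.map (fun x => k :: x) ++ ks.flatMap (grOf L))).dropWhile
          (fun x => x.head? == some k) = ks.flatMap (grOf L) := by
      have h0 := dropWhile_all_append (fun x => x.head? == some k) (grOf L k)
        (ks.flatMap (grOf L)) hA hB
      rw [hgr] at h0
      rw [List.cons_append] at h0
      exact h0
    -- remaining body of inner_render
    have hlast : (ks.flatMap (grOf L)).isEmpty = ks.isEmpty := by
      cases hks : ks with
      | nil => simp
      | cons k' ks' =>
        have : grOf L k' ≠ [] := by
          rw [grOf, Ne, List.map_eq_nil_iff, PySem.List.sorted_eq_nil_iff]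
          exact groupT_ne_nil k' L (hmem k' (by simp [hks]))
        have h1 : (k' :: ks').flatMap (grOf L) ≠ [] := by
          rw [Ne, List.flatMap_eq_nil_iff]
          intro h
          exact this (h k' (by simp))
        simp [List.isEmpty_eq_false_iff.mpr h1]
        intro h
        exact absurd h this
    set L'' := (groupT k L).filter (fun x => !x.isEmpty) with hL''def
    have hLne'' : ∀ x ∈ L'', x ≠ [] := by
      intro x hx
      rw [hL''def, List.mem_filter] at hx
      simpa using hx.2
    have hchild : trieFind (L.foldl trieInsert PyTrie.nil) k
        = L''.foldl trieInsert PyTrie.nil := by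
      rw [trieFind_foldl]
      simp only [trieFind]
      rw [hL''def, foldl_insert_filter]
    have hnil_iff : trieFind (L.foldl trieInsert PyTrie.nil) k = PyTrie.nil ↔ L'' = [] := by
      rw [hchild, foldl_insert_eq_nil]
      constructor
      · rintro ⟨-, h⟩
        cases hL : L'' with
        | nil => rfl
        | cons x xs => exact absurd (h x (by simp [hL])) (hLne'' x (by simp [hL]))
      · intro h
        refine ⟨rfl, ?_⟩
        intro x hx
        rw [h] at hx
        simp at hx
    have hmu : pvMu L'' < pvMu L :=
      lt_of_le_of_lt (pvMu_sublist (by rw [hL''def]; exact List.filter_sublist))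
        (pvMu_groupT_lt k L hkh)
    have hkeymem : k ∈ trieKeys (L.foldl trieInsert PyTrie.nil) := by
      rw [mem_trieKeys_foldl]
      exact Or.inr hkh
    have hdlt : trieDepth (trieFind (L.foldl trieInsert PyTrie.nil) k) < n :=
      lt_of_lt_of_le (trieDepth_find_lt _ k hkeymem) hdepth
    have htails : ((grOf L k).filter (fun x => 1 < x.length)).map (fun x => x.drop 1)
        = PySem.List.sorted L'' (fun x => x) false := tails_of_grOf L k
    have hchildren : ∀ pre2 : List Char,
        (if trieFind (L.foldl trieInsert PyTrie.nil) k ≠ PyTrie.nil then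
          renderAF n (trieFind (L.foldl trieInsert PyTrie.nil) k) pre2
        else [])
        = (if (((grOf L k).filter (fun x => 1 < x.length)).map (fun x => x.drop 1)).isEmpty then []
          else renderB (((grOf L k).filter (fun x => 1 < x.length)).map (fun x => x.drop 1))
            pre2) := by
      intro pre2
      rw [htails]
      by_cases hL : L'' = []
      · have h1 : trieFind (L.foldl trieInsert PyTrie.nil) k = PyTrie.nil := hnil_iff.mpr hL
        rw [h1, hL]
        simp [PySem.List.sorted_eq_nil_iff]
      · have h1 : trieFind (L.foldl trieInsert PyTrie.nil) k ≠ PyTrie.nil :=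
          fun hc => hL (hnil_iff.mp hc)
        have h2 : PySem.List.sorted L'' (fun x => x) false ≠ [] := by
          rw [Ne, PySem.List.sorted_eq_nil_iff]; exact hL
        rw [if_pos h1, if_neg (by simp [h2])]
        rw [renderAF_fuel n (trieDepth (trieFind (L.foldl trieInsert PyTrie.nil) k) + 1) _ _
            hdlt (Nat.lt_succ_self _), hchild]
        exact outerIH L'' hmu hLne'' _
    have hrest : renderKeys n (L.foldl trieInsert PyTrie.nil) ks pre
        = renderB (ks.flatMap (grOf L)) pre :=
      ihks n pre (fun k' h => hmem k' (by simp [h])) (List.pairwise_cons.mp hpair).2 hdepth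
    rw [hflat]
    simp only [renderKeys, renderB]
    rw [htake, hdrop, hlast, hchildren _, hrest]

theorem main_render : ∀ (N : Nat) (L : List (List (List Char))), pvMu L ≤ N →
    (∀ x ∈ L, x ≠ []) → ∀ pre : List Char,
    renderAF (trieDepth (L.foldl trieInsert PyTrie.nil) + 1) (L.foldl trieInsert PyTrie.nil) pre
      = renderB (PySem.List.sorted L (fun x => x) false) pre := by
  intro N
  induction N using Nat.strong_induction_on with
  | _ N ihN =>
    intro L hN hne pre
    have hkeys : PySem.List.sorted (trieKeys (L.foldl trieInsert PyTrie.nil)) (fun k => k) false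
        = sortedHeads L := by
      rw [sortedHeads]
      apply sortedK_eq_of_perm
      rw [List.perm_ext_iff_of_nodup
        (nodup_trieKeys_foldl L PyTrie.nil (by simp [trieKeys]))
        (PySem.List.nodup_dedup _)]
      intro a
      rw [mem_trieKeys_foldl, PySem.List.mem_dedup]
      simp [trieKeys]
    rw [sorted_decomp L hne]
    simp only [renderAF]
    rw [hkeys]
    apply inner_render L
    · intro L' hmu hne' pre'
      exact ihN (pvMu L') (by omega) L' (le_refl _) hne' pre'
    · intro k hk; rwa [mem_sortedHeads] at hk
    · exact pairwise_lt_sortedHeads L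
    · exact le_refl _
theorem splitOn_go_ne_nil (sep : List Char) : ∀ (fuel : Nat) (l cur : List Char)
    (acc : List (List Char)), PySem.Chars.splitOn.go sep fuel l cur acc ≠ [] := by
  intro fuel
  induction fuel with
  | zero => intro l cur acc; simp [PySem.Chars.splitOn.go]
  | succ f ih =>
    intro l cur acc
    cases l with
    | nil => simp [PySem.Chars.splitOn.go]
    | cons c rest =>
      simp only [PySem.Chars.splitOn.go]
      split
      · exact ih _ _ _
      · exact ih _ _ _

theorem splitOn_ne_nil (s sep : List Char) : PySem.Chars.splitOn s sep ≠ [] := by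
  simp only [PySem.Chars.splitOn]
  exact splitOn_go_ne_nil sep _ _ _ _

-- generic facts about accumulator-append folds
theorem foldl_step_append {α β : Type} (s : List β → α → List β)
    (h : ∀ acc p, s acc p = acc ++ s [] p) :
    ∀ (xs : List α) (acc : List β), xs.foldl s acc = acc ++ xs.foldl s [] := by
  intro xs
  induction xs with
  | nil => simp
  | cons x xs ih =>
    intro acc
    rw [List.foldl_cons, ih, List.foldl_cons, ih (s [] x), h acc x, List.append_assoc]

theorem mem_foldl_step {α β : Type} (s : List β → α → List β)
    (h : ∀ acc p, s acc p = acc ++ s [] p) :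
    ∀ (xs : List α) (b : β), b ∈ xs.foldl s [] → ∃ p ∈ xs, b ∈ s [] p := by
  intro xs
  induction xs with
  | nil => simp
  | cons x xs ih =>
    intro b hb
    rw [List.foldl_cons, foldl_step_append s h, List.mem_append] at hb
    rcases hb with hb | hb
    · exact ⟨x, by simp, by simpa using hb⟩
    · rcases ih b hb with ⟨p, hp, hbp⟩
      exact ⟨p, by simp [hp], hbp⟩

theorem foldl_trie_of_steps {α : Type} (sA : PyTrie → α → PyTrie)
    (sB : List (List (List Char)) → α → List (List (List Char)))
    (hB : ∀ acc p, sB acc p = acc ++ sB [] p)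
    (hrel : ∀ t p, sA t p = (sB [] p).foldl trieInsert t) :
    ∀ (xs : List α) (t : PyTrie), xs.foldl sA t = (xs.foldl sB []).foldl trieInsert t := by
  intro xs
  induction xs with
  | nil => simp
  | cons x xs ih =>
    intro t
    rw [List.foldl_cons, ih, List.foldl_cons, hrel,
      foldl_step_append sB hB xs (sB [] x), List.foldl_append]

theorem build_eq (paths : List String) (root : String) :
    build_tree_lines paths root = build_tree_lines_alt paths root := by
  unfold build_tree_lines build_tree_lines_alt
  dsimp only
  refine congrArg _ ?_
  have hB : ∀ (acc : List (List (List Char))) (p : String),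
      (fun (acc : List (List (List Char))) (p : String) =>
        if p.toList = pvRstripSlash root.toList ++ ['/'] then acc
        else
          let rel := PySem.Chars.stripChars
            (p.toList.drop (pvRstripSlash root.toList ++ ['/']).length) ['/']
          if rel = [] then acc else acc ++ [PySem.Chars.splitOn rel ['/']]) acc p
      = acc ++ (fun (acc : List (List (List Char))) (p : String) =>
        if p.toList = pvRstripSlash root.toList ++ ['/'] then acc
        else
          let rel := PySem.Chars.stripChars
            (p.toList.drop (pvRstripSlash root.toList ++ ['/']).length) ['/']
          if rel = [] then acc else acc ++ [PySem.Chars.splitOn rel ['/']]) [] p := by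
    intro acc p
    dsimp only
    split_ifs <;> simp
  have hrel : ∀ (t : PyTrie) (p : String),
      (fun (tr : PyTrie) (p : String) =>
        if p.toList = pvRstripSlash root.toList ++ ['/'] then tr
        else
          let rel := PySem.Chars.stripChars
            (p.toList.drop (pvRstripSlash root.toList ++ ['/']).length) ['/']
          if rel = [] then tr else trieInsert tr (PySem.Chars.splitOn rel ['/'])) t p
      = ((fun (acc : List (List (List Char))) (p : String) =>
        if p.toList = pvRstripSlash root.toList ++ ['/'] then acc
        else
          let rel := PySem.Chars.stripChars
            (p.toList.drop (pvRstripSlash root.toList ++ ['/']).length) ['/']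
          if rel = [] then acc else acc ++ [PySem.Chars.splitOn rel ['/']]) [] p).foldl
            trieInsert t := by
    intro t p
    dsimp only
    split_ifs <;> rfl
  rw [foldl_trie_of_steps _ _ hB hrel paths PyTrie.nil]
  apply main_render (pvMu _) _ (le_refl _)
  intro x hx
  rcases mem_foldl_step _ hB paths x hx with ⟨p, _, hxp⟩
  dsimp only at hxp
  split_ifs at hxp
  · simp at hxp
  · simp at hxp
  · rw [List.nil_append, List.mem_singleton] at hxp
    subst hxp
    exact splitOn_ne_nil _ _

-- ===== VERDICT (by name: the statement is the Claim_ definition above) =====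
theorem build_tree_lines_spec : Claim_equal_build_tree_lines := by
  intro paths root _
  unfold Spec_build_tree_lines
  exact build_eq paths root
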